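-- pv_equiv track=rewrite | github.com/HyunbeenLim/algorithm | Programmers/sort/가장큰수.py | solution
-- ===== SOURCE A (Python) =====
-- def solution(numbers):
--     numbers = list(map(str, numbers))
--     answer = ''
--
--     while numbers:
--         max_index, max_value = max(enumerate(numbers), key=lambda x: x[1][0])
--         answer += max_value
--         numbers.pop(max_index)
--
--     return answer
-- ===== SOURCE B (Python) =====
-- def solution(numbers):
--     buckets = {}
--     for n in numbers:
--         s = str(n)
--         buckets.setdefault(s[0], []).append(s)
--     return ''.join(''.join(buckets[c]) for c in sorted(buckets, reverse=True))
-- ===== Notes on version B (the rewrite author's own statement) =====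
-- stated objective: faster
-- what changed: A repeatedly scans the remaining list for the leftmost string with maximal first character and pops it (quadratic selection); B makes one pass bucketing the strings by first character into a dict (keeping encounter order) and concatenates the buckets in descending key order.
import Mathlib
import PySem

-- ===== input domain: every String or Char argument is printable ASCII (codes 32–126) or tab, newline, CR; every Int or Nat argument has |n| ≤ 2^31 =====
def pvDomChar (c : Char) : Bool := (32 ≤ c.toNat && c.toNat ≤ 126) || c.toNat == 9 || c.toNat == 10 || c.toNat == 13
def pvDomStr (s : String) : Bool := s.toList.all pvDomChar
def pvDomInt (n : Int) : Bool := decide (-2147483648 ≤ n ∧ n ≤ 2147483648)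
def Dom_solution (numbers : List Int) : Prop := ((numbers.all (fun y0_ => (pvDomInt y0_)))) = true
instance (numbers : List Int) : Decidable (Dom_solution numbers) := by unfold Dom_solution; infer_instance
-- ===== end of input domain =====

-- B replaces A's repeated max-scan-and-pop by one bucketing pass over the strings keyed on
-- the first character, emitting buckets in descending key order (objective: faster).

-- ===== PORT A =====
-- s[0] as both programs use it; total form: every string here is str(int), never empty.
def pvKey (s : String) : Char := (PySem.Str.pyGet? s 0).getD ' '

-- the while loop: each pop removes exactly one element, so the loop runs exactly
-- (initial length) times — the fuel argument is that count, not an approximation.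
def pvLoopA : Nat → List String → String → String
  | 0, _, answer => answer
  | _ + 1, [], answer => answer
  | n + 1, s :: t, answer =>
    match PySem.List.max? (PySem.List.enumerate (s :: t)) (fun x => pvKey x.2) with
    | none => answer  -- unreachable: the list is nonempty
    | some (maxIdx, maxVal) =>
      match PySem.List.pop? (s :: t) maxIdx with
      | none => answer ++ maxVal  -- unreachable: maxIdx is a valid index
      | some (_, rest) => pvLoopA n rest (answer ++ maxVal)

def solution (numbers : List Int) : String :=
  pvLoopA numbers.length (numbers.map PySem.Int.toStr) ""

-- ===== PORT B =====
def solution_alt (numbers : List Int) : String :=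
  let buckets : PySem.Dict Char (List String) :=
    numbers.foldl (fun d n =>
      let s := PySem.Int.toStr n
      PySem.Dict.modify d (pvKey s) [] (fun l => l ++ [s])) PySem.Dict.empty
  PySem.Str.join "" ((PySem.List.sorted buckets.keys (fun c => c) true).map
    (fun c => PySem.Str.join "" (buckets.getD c [])))

-- ===== PRECONDITION & SPEC =====
def Spec_solution (numbers : List Int) (out : String) : Prop := out = solution_alt numbers
instance (numbers : List Int) (out : String) : Decidable (Spec_solution numbers out) := by unfold Spec_solution; infer_instance

-- ===== CLAIM (what is proved, stated in full; the proofs are below) =====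
def Claim_equal_solution : Prop := ∀ (numbers : List Int), Dom_solution numbers → Spec_solution numbers (solution numbers)

-- ===== LEMMAS AND PROOFS =====

-- the distinct first characters of ss, in strictly descending order
def pvK (ss : List String) : List Char :=
  PySem.List.sorted (PySem.Set.ofList (ss.map pvKey)) (fun c => c) true

-- the characters contributed by the bucket of first character c
def pvBucket (c : Char) (ss : List String) : List Char :=
  ((ss.filter (fun s => pvKey s == c)).map String.toList).flatten

-- the common normal form of both programs' output
def pvTarget (ss : List String) : List Char :=
  ((pvK ss).map (fun c => pvBucket c ss)).flatten

lemma pv_perm_of_nodup_of_mem_iff {α : Type} [DecidableEq α] (xs ys : List α)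
    (hx : xs.Nodup) (hy : ys.Nodup) (h : ∀ a, a ∈ xs ↔ a ∈ ys) : xs.Perm ys := by
  rw [List.perm_iff_count]
  intro a
  by_cases hm : a ∈ xs
  · rw [List.count_eq_one_of_mem hx hm, List.count_eq_one_of_mem hy ((h a).1 hm)]
  · rw [List.count_eq_zero_of_not_mem hm, List.count_eq_zero_of_not_mem (fun c => hm ((h a).2 c))]

-- pvK of a list whose distinct keys are exactly those of the strictly descending cs is cs
lemma pv_K_eq (ss : List String) (cs : List Char) (hnd : cs.Nodup)
    (hp : cs.Pairwise (fun a b => b < a)) (hm : ∀ a, a ∈ cs ↔ a ∈ ss.map pvKey) :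
    pvK ss = cs := by
  apply PySem.List.sorted_rev_eq_of_perm_of_pairwise_gt
  · exact pv_perm_of_nodup_of_mem_iff _ _ hnd (PySem.Set.nodup_ofList _)
      (fun a => (hm a).trans (PySem.Set.mem_ofList _ a).symm)
  · exact hp

lemma pv_K_nodup (ss : List String) : (pvK ss).Nodup :=
  (PySem.List.sorted_perm _ _ _).nodup_iff.2 (PySem.Set.nodup_ofList _)

lemma pv_K_mem (ss : List String) (a : Char) : a ∈ pvK ss ↔ a ∈ ss.map pvKey := by
  unfold pvK
  rw [(PySem.List.sorted_perm _ _ _).mem_iff, PySem.Set.mem_ofList]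

lemma pv_K_pairwise (ss : List String) : (pvK ss).Pairwise (fun a b => b < a) := by
  have h1 := PySem.List.sorted_pairwise_rev (PySem.Set.ofList (ss.map pvKey)) (fun c => c) (κ := Char)
  have h2 := pv_K_nodup ss
  have := List.Pairwise.and h1 h2
  exact this.imp (fun {a b} h => lt_of_le_of_ne h.1 (Ne.symm h.2))

-- the maximal key heads pvK
lemma pv_K_head (l r : List String) (v : String)
    (hl : ∀ s ∈ l, pvKey s < pvKey v) (hr : ∀ s ∈ r, pvKey s ≤ pvKey v) :
    ∃ T : List Char, pvK (l ++ v :: r) = pvKey v :: T := by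
  have hmem : pvKey v ∈ PySem.Set.ofList ((l ++ v :: r).map pvKey) := by
    rw [PySem.Set.mem_ofList]
    exact List.mem_map_of_mem (by simp)
  have hperm := PySem.List.sorted_perm (PySem.Set.ofList ((l ++ v :: r).map pvKey)) (fun c => c) true
  match hK : pvK (l ++ v :: r) with
  | [] =>
    exfalso
    unfold pvK at hK
    rw [hK] at hperm
    exact absurd (hperm.symm.mem_iff.1 hmem) (List.not_mem_nil)
  | c :: T =>
    have hhead := PySem.List.key_head_sorted_rev_ge _ _ hK
    have hcm : c ≤ pvKey v := by
      have hc : c ∈ PySem.Set.ofList ((l ++ v :: r).map pvKey) := by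
        unfold pvK at hK
        rw [hK] at hperm
        exact hperm.mem_iff.1 (by simp)
      rw [PySem.Set.mem_ofList] at hc
      obtain ⟨s, hs, rfl⟩ := List.mem_map.1 hc
      rcases List.mem_append.1 hs with hs | hs
      · exact le_of_lt (hl s hs)
      · rcases List.mem_cons.1 hs with rfl | hs
        · exact le_refl _
        · exact hr s hs
    have : pvKey v ≤ c := hhead _ hmem
    exact ⟨T, by rw [le_antisymm hcm this]⟩

-- extracting the leftmost maximal-key element peels it off the normal form
lemma pv_target_step (l r : List String) (v : String)
    (hl : ∀ s ∈ l, pvKey s < pvKey v) (hr : ∀ s ∈ r, pvKey s ≤ pvKey v) :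
    pvTarget (l ++ v :: r) = v.toList ++ pvTarget (l ++ r) := by
  obtain ⟨T, hK⟩ := pv_K_head l r v hl hr
  have hnd : (pvKey v :: T).Nodup := hK ▸ pv_K_nodup (l ++ v :: r)
  have hpw : (pvKey v :: T).Pairwise (fun a b => b < a) := hK ▸ pv_K_pairwise (l ++ v :: r)
  have hmemK : ∀ a, a ∈ pvKey v :: T ↔ a ∈ (l ++ v :: r).map pvKey :=
    fun a => hK ▸ pv_K_mem (l ++ v :: r) a
  have hbucket_ne : ∀ c, c ≠ pvKey v → pvBucket c (l ++ v :: r) = pvBucket c (l ++ r) := by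
    intro c hc
    unfold pvBucket
    simp only [List.filter_append, List.filter_cons]
    have : (pvKey v == c) = false := by simp [Ne.symm hc]
    rw [this]
    simp
  have hbucket_eq : pvBucket (pvKey v) (l ++ v :: r) = v.toList ++ pvBucket (pvKey v) (l ++ r) := by
    unfold pvBucket
    simp only [List.filter_append, List.filter_cons]
    have h1 : l.filter (fun s => pvKey s == pvKey v) = [] := by
      rw [List.filter_eq_nil_iff]
      intro s hs
      simp [ne_of_lt (hl s hs)]
    rw [h1]
    simp
  have hTne : ∀ c ∈ T, c ≠ pvKey v :=
    fun c hc => ne_of_lt ((List.pairwise_cons.1 hpw).1 c hc)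
  have hmss : ∀ a, a ∈ (l ++ v :: r).map pvKey ↔ a = pvKey v ∨ a ∈ (l ++ r).map pvKey := by
    intro a
    simp only [List.map_append, List.map_cons, List.mem_append, List.mem_cons]
    tauto
  unfold pvTarget
  rw [hK, List.map_cons, List.flatten_cons, hbucket_eq,
      List.map_congr_left (fun c hc => hbucket_ne c (hTne c hc)), List.append_assoc]
  congr 1
  by_cases hm : pvKey v ∈ (l ++ r).map pvKey
  · have hK' : pvK (l ++ r) = pvKey v :: T := by
      apply pv_K_eq _ _ hnd hpw
      intro a
      rw [hmemK a, hmss a]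
      constructor
      · rintro (rfl | h)
        · exact hm
        · exact h
      · intro h
        right
        exact h
    rw [hK', List.map_cons, List.flatten_cons]
  · have hnil : pvBucket (pvKey v) (l ++ r) = [] := by
      unfold pvBucket
      have : (l ++ r).filter (fun s => pvKey s == pvKey v) = [] := by
        rw [List.filter_eq_nil_iff]
        intro s hs
        simp only [beq_iff_eq]
        intro hkey
        exact hm (hkey ▸ List.mem_map_of_mem hs)
      rw [this]; rfl
    have hK' : pvK (l ++ r) = T := by
      apply pv_K_eq _ _ (List.nodup_cons.1 hnd).2 (List.pairwise_cons.1 hpw).2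
      intro a
      constructor
      · intro ha
        rcases (hmss a).1 ((hmemK a).1 (List.mem_cons_of_mem _ ha)) with rfl | h
        · exact absurd ha ((List.nodup_cons.1 hnd).1)
        · exact h
      · intro ha
        rcases List.mem_cons.1 ((hmemK a).2 ((hmss a).2 (Or.inr ha))) with rfl | h
        · exact absurd ha hm
        · exact h
    rw [hnil, hK']
    rfl

-- the running best of Python's max(enumerate(...), key=...), as a named function
def pvG (acc : Option (Int × String)) (x : Int × String) : Option (Int × String) :=
  match acc with
  | none => some x
  | some m => if pvKey m.2 < pvKey x.2 then some x else some m

lemma pv_max?_eq (xs : List (Int × String)) :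
    PySem.List.max? xs (fun x => pvKey x.2) = xs.foldl pvG none := by
  unfold PySem.List.max?
  congr 1
  funext acc x
  cases acc with
  | none => rfl
  | some m => by_cases h : pvKey m.2 < pvKey x.2 <;> simp [pvG, h]

lemma pv_fold_spec : ∀ (l : List String) (k : Int) (b : Int × String),
    (List.foldl pvG (some b) (PySem.List.enumerate l k) = some b ∧ ∀ s ∈ l, pvKey s ≤ pvKey b.2)
    ∨ (∃ (j : Nat) (h : j < l.length),
        List.foldl pvG (some b) (PySem.List.enumerate l k) = some (k + j, l[j]) ∧
        pvKey b.2 < pvKey l[j] ∧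
        (∀ j' (h' : j' < j), pvKey (l[j']'(by omega)) < pvKey l[j]) ∧
        (∀ j' (h' : j' < l.length), pvKey l[j'] ≤ pvKey l[j])) := by
  intro l
  induction l with
  | nil =>
    intro k b
    left
    exact ⟨by simp [PySem.List.enumerate_nil], by simp⟩
  | cons x t ih =>
    intro k b
    rw [PySem.List.enumerate_cons, List.foldl_cons]
    by_cases hx : pvKey b.2 < pvKey x
    · have hg : pvG (some b) (k, x) = some (k, x) := by simp [pvG, hx]
      rw [hg]
      rcases ih (k + 1) (k, x) with ⟨heq, hle⟩ | ⟨j, hj, heq, hgt, hbefore, hall⟩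
      · right
        refine ⟨0, by simp, by simpa using heq, by simpa using hx, ?_, ?_⟩
        · intro j' h'; exact absurd h' (Nat.not_lt_zero j')
        · intro j' h'
          cases j' with
          | zero => simp
          | succ j'' =>
            simp only [List.getElem_cons_succ, List.getElem_cons_zero]
            exact hle _ (List.getElem_mem _)
      · right
        refine ⟨j + 1, by simpa using Nat.succ_lt_succ hj, ?_, ?_, ?_, ?_⟩
        · simp only [List.getElem_cons_succ]
          push_cast
          rw [heq]
          congr 2
          ring
        · simp only [List.getElem_cons_succ]
          exact lt_trans hx hgt
        · intro j' h'
          cases j' with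
          | zero => simpa using hgt
          | succ j'' => simpa using hbefore j'' (by omega)
        · intro j' h'
          cases j' with
          | zero => simpa using le_of_lt hgt
          | succ j'' =>
            simp only [List.getElem_cons_succ]
            exact hall j'' (by simpa using h')
    · have hg : pvG (some b) (k, x) = some b := by simp [pvG, hx]
      rw [hg]
      rcases ih (k + 1) b with ⟨heq, hle⟩ | ⟨j, hj, heq, hgt, hbefore, hall⟩
      · left
        refine ⟨heq, ?_⟩
        intro s hs
        rcases List.mem_cons.1 hs with rfl | hs
        · exact le_of_not_gt hx
        · exact hle s hs
      · right
        refine ⟨j + 1, by simpa using Nat.succ_lt_succ hj, ?_, ?_, ?_, ?_⟩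
        · simp only [List.getElem_cons_succ]
          push_cast
          rw [heq]
          congr 2
          ring
        · simp only [List.getElem_cons_succ]; exact hgt
        · intro j' h'
          cases j' with
          | zero =>
            simp only [List.getElem_cons_succ, List.getElem_cons_zero]
            exact lt_of_le_of_lt (le_of_not_gt hx) hgt
          | succ j'' => simpa using hbefore j'' (by omega)
        · intro j' h'
          cases j' with
          | zero =>
            simp only [List.getElem_cons_succ, List.getElem_cons_zero]
            exact le_of_lt (lt_of_le_of_lt (le_of_not_gt hx) hgt)
          | succ j'' =>
            simp only [List.getElem_cons_succ]
            exact hall j'' (by simpa using h')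

-- max(enumerate(numbers), key=...) returns the first index attaining the maximal key
lemma pv_max?_spec (s : String) (t : List String) :
    ∃ (i : Nat) (h : i < (s :: t).length),
      PySem.List.max? (PySem.List.enumerate (s :: t)) (fun x => pvKey x.2)
        = some ((i : Int), (s :: t)[i]) ∧
      (∀ j (_ : j < i), pvKey ((s :: t)[j]'(by omega)) < pvKey ((s :: t)[i])) ∧
      (∀ j (hj : j < (s :: t).length), pvKey ((s :: t)[j]) ≤ pvKey ((s :: t)[i])) := by
  rw [pv_max?_eq, PySem.List.enumerate_cons, List.foldl_cons]
  have hg : pvG none (0, s) = some (0, s) := rfl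
  rw [hg]
  rcases pv_fold_spec t 1 (0, s) with ⟨heq, hle⟩ | ⟨j, hj, heq, hgt, hbefore, hall⟩
  · refine ⟨0, by simp, by simpa using heq, ?_, ?_⟩
    · intro j h; exact absurd h (Nat.not_lt_zero j)
    · intro j hj
      cases j with
      | zero => simp
      | succ j' =>
        simp only [List.getElem_cons_succ, List.getElem_cons_zero]
        exact hle _ (List.getElem_mem _)
  · refine ⟨j + 1, by simpa using Nat.succ_lt_succ hj, ?_, ?_, ?_⟩
    · simp only [List.getElem_cons_succ]
      push_cast
      rw [heq]
      congr 2
      ring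
    · intro j' h'
      cases j' with
      | zero => simpa using hgt
      | succ j'' => simpa using hbefore j'' (by omega)
    · intro j' h'
      cases j' with
      | zero => simpa using le_of_lt hgt
      | succ j'' =>
        simp only [List.getElem_cons_succ]
        exact hall j'' (by simpa using h')

-- A's loop appends exactly the normal form to the accumulator
lemma pv_loopA_spec : ∀ (n : Nat) (ss : List String) (ans : String), ss.length ≤ n →
    (pvLoopA n ss ans).toList = ans.toList ++ pvTarget ss := by
  intro n
  induction n with
  | zero =>
    intro ss ans hlen
    have : ss = [] := List.eq_nil_of_length_eq_zero (Nat.le_zero.1 hlen)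
    subst this
    simp [pvLoopA, pvTarget, pvK, PySem.List.sorted, PySem.Set.ofList]
  | succ n ih =>
    intro ss ans hlen
    match ss with
    | [] => simp [pvLoopA, pvTarget, pvK, PySem.List.sorted, PySem.Set.ofList]
    | s :: t =>
      obtain ⟨i, hi, heq, hbefore, hall⟩ := pv_max?_spec s t
      have hpop := PySem.List.pop?_natCast (s :: t) i hi
      unfold pvLoopA
      rw [heq]
      dsimp only
      rw [hpop]
      dsimp only
      have hdecomp : s :: t = (s :: t).take i ++ (s :: t)[i] :: (s :: t).drop (i + 1) := by
        rw [List.getElem_cons_drop]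
        exact (List.take_append_drop i (s :: t)).symm
      have hl : ∀ x ∈ (s :: t).take i, pvKey x < pvKey ((s :: t)[i]) := by
        intro x hx
        obtain ⟨j, hj, hxe⟩ := List.mem_iff_getElem.1 hx
        have hj' : j < i := by
          rw [List.length_take] at hj
          omega
        rw [← hxe, List.getElem_take]
        exact hbefore j hj'
      have hr : ∀ x ∈ (s :: t).drop (i + 1), pvKey x ≤ pvKey ((s :: t)[i]) := by
        intro x hx
        obtain ⟨j, hj, hxe⟩ := List.mem_iff_getElem.1 hx
        rw [← hxe, List.getElem_drop]
        exact hall (i + 1 + j) (by rw [List.length_drop] at hj; omega)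
      have hlen' : ((s :: t).eraseIdx i).length ≤ n := by
        rw [List.length_eraseIdx_of_lt hi]
        simpa using Nat.le_of_succ_le_succ hlen
      rw [ih ((s :: t).eraseIdx i) (ans ++ (s :: t)[i]) hlen']
      rw [List.eraseIdx_eq_take_drop_succ]
      conv_rhs => rw [hdecomp]
      rw [pv_target_step _ _ _ hl hr]
      simp [String.toList_append]

lemma pv_flatten_intersperse (xs : List (List Char)) :
    (List.intersperse [] xs).flatten = xs.flatten := by
  induction xs with
  | nil => rfl
  | cons x t ih =>
    cases t with
    | nil => rfl
    | cons y u =>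
      rw [show List.intersperse [] (x :: y :: u) = x :: [] :: List.intersperse [] (y :: u) from rfl]
      simp only [List.flatten_cons, List.nil_append] at *
      rw [ih]

-- ''.join(parts) is the flat concatenation of the parts' characters
lemma pv_join_nil (parts : List String) :
    PySem.Str.join "" parts = String.ofList ((parts.map String.toList).flatten) := by
  show String.ofList (PySem.Chars.join (String.toList "") (parts.map String.toList)) = _
  congr 1
  rw [show String.toList "" = [] from rfl]
  show List.intercalate [] (parts.map String.toList) = _
  rw [List.intercalate]
  exact pv_flatten_intersperse _

-- B computes exactly the normal form
lemma pv_alt_spec (numbers : List Int) :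
    solution_alt numbers = String.ofList (pvTarget (numbers.map PySem.Int.toStr)) := by
  unfold solution_alt
  dsimp only
  set pairs := numbers.map (fun n => (pvKey (PySem.Int.toStr n), PySem.Int.toStr n)) with hpairs
  set bk := pairs.foldl (fun d p => PySem.Dict.modify d p.1 [] (fun l => l ++ [p.2])) PySem.Dict.empty with hbk
  have hfold : List.foldl (fun d n => PySem.Dict.modify d (pvKey (PySem.Int.toStr n)) [] (fun l => l ++ [PySem.Int.toStr n])) PySem.Dict.empty numbers = bk := by
    rw [hbk, hpairs, List.foldl_map]
  rw [hfold]
  have hkeys : bk.keys = PySem.Set.ofList ((numbers.map PySem.Int.toStr).map pvKey) := by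
    rw [hbk]
    rw [show (fun (d : PySem.Dict Char (List String)) (p : Char × String) => PySem.Dict.modify d p.1 [] (fun l => l ++ [p.2]))
          = (fun d p => PySem.Dict.modify d ((fun q : Char × String => q.1) p) [] ((fun (_ : PySem.Dict Char (List String)) (q : Char × String) => fun l => l ++ [q.2]) d p)) from rfl]
    rw [PySem.Dict.keys_foldl_modify_key]
    rw [PySem.Dict.keys_empty, PySem.Set.update_nil_left]
    congr 1
    rw [hpairs]
    simp [List.map_map, Function.comp]
  have hgetD : ∀ c, bk.getD c [] = (numbers.map PySem.Int.toStr).filter (fun s => pvKey s == c) := by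
    intro c
    rw [hbk, PySem.Dict.getD_foldl_modify_append, PySem.Dict.getD_empty, hpairs]
    simp [List.filter_map, List.map_map, Function.comp_def]
  rw [hkeys]
  rw [pv_join_nil]
  show _ = String.ofList (((pvK (numbers.map PySem.Int.toStr)).map (fun c => pvBucket c (numbers.map PySem.Int.toStr))).flatten)
  congr 1
  unfold pvK
  rw [List.map_map]
  congr 1
  apply List.map_congr_left
  intro c _
  show (PySem.Str.join "" (bk.getD c [])).toList = pvBucket c (numbers.map PySem.Int.toStr)
  rw [hgetD c, pv_join_nil]
  simp [pvBucket]

-- ===== VERDICT (by name: the statement is the Claim_ definition above) =====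
theorem solution_spec : Claim_equal_solution := by
  intro numbers _
  unfold Spec_solution
  rw [pv_alt_spec]
  have h : (solution numbers).toList = pvTarget (numbers.map PySem.Int.toStr) := by
    simpa [solution] using
      pv_loopA_spec numbers.length (numbers.map PySem.Int.toStr) "" (by simp)
  have hback : String.ofList (solution numbers).toList = solution numbers := by simp
  rw [← hback, h]
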